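-- pv_equiv track=rewrite | github.com/alexjust-data/TSIS-SmallCaps | scripts/utils/show_intraday_1m_days.py | format_days_by_month
-- ===== SOURCE A (Python) =====
-- from collections import defaultdict
-- from typing import Set, Dict, List
--
-- def format_days_by_month(dates: List[str]) -> Dict[str, List[int]]:
--     """
--     Agrupa fechas por mes y extrae solo los días.
--
--     Args:
--         dates: Lista de strings 'YYYY-MM-DD'
--
--     Returns:
--         Dict {month_str: [days]}
--     """
--     by_month = defaultdict(list)
--
--     for date_str in sorted(dates):
--         try:
--             # date_str puede ser 'YYYY-MM-DD' o un objeto date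
--             if isinstance(date_str, str):
--                 month = date_str[:7]  # 'YYYY-MM'
--                 day = int(date_str[8:10])
--             else:
--                 month = f"{date_str.year:04d}-{date_str.month:02d}"
--                 day = date_str.day
--
--             by_month[month].append(day)
--         except:
--             continue
--
--     return by_month
-- ===== SOURCE B (Python) =====
-- from collections import defaultdict
-- from typing import Dict, List
--
-- def format_days_by_month(dates: List[str]) -> Dict[str, List[int]]:
--     # Group first (one pass over the raw list), then sort month keys and each bucket.
--     buckets = {}
--     for s in dates:
--         try:
--             int(s[8:10])
--         except ValueError:
--             continue
--         buckets.setdefault(s[:7], []).append(s)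
--     result = defaultdict(list)
--     for month in sorted(buckets):
--         result[month] = [int(s[8:10]) for s in sorted(buckets[month])]
--     return result
-- ===== Notes on version B (the rewrite author's own statement) =====
-- stated objective: alternative
-- what changed: Instead of globally sorting all dates and then grouping with per-element try/except, B groups raw dates into per-month buckets in one pass and only then sorts the (few, distinct) month keys and each bucket individually.
import Mathlib
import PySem

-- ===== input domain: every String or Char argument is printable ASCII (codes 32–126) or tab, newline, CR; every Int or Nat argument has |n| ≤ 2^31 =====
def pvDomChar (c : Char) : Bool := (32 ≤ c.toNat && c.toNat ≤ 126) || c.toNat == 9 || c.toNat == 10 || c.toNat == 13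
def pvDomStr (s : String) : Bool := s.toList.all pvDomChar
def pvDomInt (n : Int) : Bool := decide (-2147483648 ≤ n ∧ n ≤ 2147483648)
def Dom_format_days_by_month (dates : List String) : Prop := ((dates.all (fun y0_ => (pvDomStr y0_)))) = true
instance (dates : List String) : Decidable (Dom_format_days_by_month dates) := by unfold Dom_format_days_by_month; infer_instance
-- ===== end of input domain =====

-- B groups the raw dates into per-month buckets in one pass and only then sorts the month keys
-- and each bucket, instead of A's global sort followed by a grouping pass (alternative
-- decomposition, same return value).

-- ===== PORT A =====
def pvMonth (s : String) : String := PySem.Str.slice s none (some 7)      -- s[:7]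
def pvDay? (s : String) : Option Int := PySem.Int.ofStr? (PySem.Str.slice s (some 8) (some 10))  -- int(s[8:10]); none = ValueError

-- the body of A's for-loop: try: day = int(s[8:10]) … by_month[month].append(day) … except: continue
def pvStepA (d : PySem.Dict String (List Int)) (s : String) : PySem.Dict String (List Int) :=
  match pvDay? s with
  | some day => d.modify (pvMonth s) [] (· ++ [day])
  | none => d

def format_days_by_month (dates : List String) : List (String × List Int) :=
  ((PySem.List.sorted dates (fun x => x) false).foldl pvStepA PySem.Dict.empty).items

-- ===== PORT B =====
-- the body of B's first loop: try: int(s[8:10]) … buckets.setdefault(s[:7], []).append(s) … except ValueError: continue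
def pvStepB (b : PySem.Dict String (List String)) (s : String) : PySem.Dict String (List String) :=
  match pvDay? s with
  | some _ => b.modify (pvMonth s) [] (· ++ [s])
  | none => b

def pvBuckets (dates : List String) : PySem.Dict String (List String) :=
  dates.foldl pvStepB PySem.Dict.empty

def format_days_by_month_alt (dates : List String) : List (String × List Int) :=
  ((PySem.List.sorted (pvBuckets dates).keys (fun x => x) false).foldl
    (fun r m => r.insert m
      ((PySem.List.sorted ((pvBuckets dates).getD m []) (fun x => x) false).map
        (fun s => (pvDay? s).getD 0)))                     -- [int(s[8:10]) for s in sorted(buckets[month])]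
    PySem.Dict.empty).items

-- ===== PRECONDITION & SPEC =====
def Spec_format_days_by_month (dates : List String) (out : List (String × List Int)) : Prop := out = format_days_by_month_alt dates
instance (dates : List String) (out : List (String × List Int)) : Decidable (Spec_format_days_by_month dates out) := by unfold Spec_format_days_by_month; infer_instance

-- ===== CLAIM (what is proved, stated in full; the proofs are below) =====
def Claim_equal_format_days_by_month : Prop := ∀ (dates : List String), Dom_format_days_by_month dates → Spec_format_days_by_month dates (format_days_by_month dates)

-- ===== LEMMAS AND PROOFS =====

-- abbreviations used only in the proofs
def pvP (s : String) : Bool := (pvDay? s).isSome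
def pvPm (m s : String) : Bool := pvP s && (pvMonth s == m)
def pvDayD (s : String) : Int := (pvDay? s).getD 0

-- a skip-on-none grouping loop is the pair-grouping loop over the filterMapped stream
theorem pv_fold_skip {β : Type} (g : String → Option β)
    (F : PySem.Dict String (List β) → String → PySem.Dict String (List β))
    (hF : ∀ d s, F d s = (g s).elim d (fun b => d.modify (pvMonth s) [] (· ++ [b])))
    (l : List String) (d : PySem.Dict String (List β)) :
    l.foldl F d
    = (l.filterMap (fun s => (g s).map (fun b => (pvMonth s, b)))).foldl
        (fun d p => d.modify p.1 [] (· ++ [p.2])) d := by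
  induction l generalizing d with
  | nil => rfl
  | cons s t ih =>
    cases h : g s <;> simp [hF, h, ih]

theorem pv_stepA_elim (d : PySem.Dict String (List Int)) (s : String) :
    pvStepA d s = (pvDay? s).elim d (fun b => d.modify (pvMonth s) [] (· ++ [b])) := by
  unfold pvStepA; cases pvDay? s <;> rfl

theorem pv_stepB_elim (b : PySem.Dict String (List String)) (s : String) :
    pvStepB b s = ((pvDay? s).map (fun _ => s)).elim b
      (fun x => b.modify (pvMonth s) [] (· ++ [x])) := by
  unfold pvStepB; cases pvDay? s <;> rfl

theorem pv_stream_map_fst {β : Type} (g : String → Option β) (l : List String)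
    (hg : ∀ s, (g s).isSome = pvP s) :
    ((l.filterMap (fun s => (g s).map (fun b => (pvMonth s, b)))).map (·.1))
    = (l.filter pvP).map pvMonth := by
  induction l with
  | nil => rfl
  | cons s t ih =>
    cases h : g s with
    | none =>
      have hp : pvP s = false := by have := (hg s).symm; simpa [h] using this
      simp [h, hp, ih]
    | some b =>
      have hp : pvP s = true := by have := (hg s).symm; simpa [h] using this
      simp [h, hp, ih]

theorem pv_stream_bucket {β : Type} (g : String → Option β) (f : String → β)
    (l : List String) (m : String)
    (hg : ∀ s, (g s).isSome = pvP s)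
    (hf : ∀ s b, g s = some b → b = f s) :
    (((l.filterMap (fun s => (g s).map (fun b => (pvMonth s, b)))).filter
        (fun p => p.1 == m)).map (·.2))
    = (l.filter (pvPm m)).map f := by
  induction l with
  | nil => rfl
  | cons s t ih =>
    cases h : g s with
    | none =>
      have hp : pvP s = false := by have := (hg s).symm; simpa [h] using this
      simp [h, pvPm, hp, ih]
    | some b =>
      have hp : pvP s = true := by have := (hg s).symm; simpa [h] using this
      have hb : b = f s := hf s b h
      by_cases hm : pvMonth s == m
      · simp [h, pvPm, hp, hm, hb, ih]
      · simp [h, pvPm, hp, hm, ih]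

-- Set.ofList keeps first occurrences in order: it is a sublist of its argument
theorem pv_foldl_add_sublist {α : Type} [BEq α] (l : List α) :
    ∀ acc : List α, ∃ r, List.foldl PySem.Set.add acc l = acc ++ r ∧ r.Sublist l := by
  induction l with
  | nil => intro acc; exact ⟨[], by simp⟩
  | cons x t ih =>
    intro acc
    by_cases h : acc.contains x = true
    · obtain ⟨r, hr, hs⟩ := ih acc
      refine ⟨r, ?_, hs.cons x⟩
      simpa [PySem.Set.add, h] using hr
    · obtain ⟨r, hr, hs⟩ := ih (acc ++ [x])
      refine ⟨x :: r, ?_, hs.cons₂ x⟩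
      simpa [PySem.Set.add, h] using hr

theorem pv_ofList_sublist {α : Type} [BEq α] (l : List α) :
    (PySem.Set.ofList l).Sublist l := by
  obtain ⟨r, hr, hs⟩ := pv_foldl_add_sublist l []
  rw [PySem.Set.ofList_eq_foldl, hr]
  simpa using hs

-- lexicographic order on strings is monotone under taking a common-length prefix
theorem pv_lex_take (n : Nat) : ∀ (a b : List Char),
    List.Lex (· < ·) (a.take n) (b.take n) → List.Lex (· < ·) a b := by
  induction n with
  | zero => intro a b h; simp only [List.take_zero] at h; cases h
  | succ n ih =>
    intro a b h
    cases a with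
    | nil =>
      cases b with
      | nil => simp only [List.take_nil] at h; cases h
      | cons y bs => exact List.Lex.nil
    | cons x as =>
      cases b with
      | nil => simp only [List.take_nil] at h; cases h
      | cons y bs =>
        simp only [List.take_succ_cons] at h
        cases h with
        | rel hr => exact List.Lex.rel hr
        | cons hc => exact List.Lex.cons (ih as bs hc)

theorem pv_month_mono (a b : String) (h : a ≤ b) : pvMonth a ≤ pvMonth b := by
  rw [String.le_iff_toList_le] at h ⊢
  have ha : (pvMonth a).toList = a.toList.take 7 := by simp [pvMonth, pysem]
  have hb : (pvMonth b).toList = b.toList.take 7 := by simp [pvMonth, pysem]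
  rw [ha, hb]
  rw [← Std.not_lt] at h ⊢
  intro hlt
  exact h (pv_lex_take 7 _ _ hlt)

-- A's dict as an association list
theorem pv_A_eq (dates : List String) :
    format_days_by_month dates =
    (PySem.Set.ofList (((PySem.List.sorted dates (fun x => x) false).filter pvP).map pvMonth)).map
      (fun m => (m, ((PySem.List.sorted dates (fun x => x) false).filter (pvPm m)).map pvDayD)) := by
  unfold format_days_by_month
  rw [pv_fold_skip pvDay? pvStepA pv_stepA_elim]
  have hnd : (((PySem.List.sorted dates (fun x => x) false).filterMap
      (fun s => (pvDay? s).map (fun b => (pvMonth s, b)))).foldl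
        (fun d p => d.modify p.1 [] (· ++ [p.2])) PySem.Dict.empty).keys.Nodup :=
    PySem.Dict.nodup_keys_foldl_modify_key _ (fun (p : String × Int) => p.1) []
      (fun _ (p : String × Int) => (· ++ [p.2])) PySem.Dict.empty (by simp)
  rw [PySem.Dict.items_eq_map_keys _ hnd []]
  rw [PySem.Dict.keys_foldl_modify_key _ (fun (p : String × Int) => p.1) []
      (fun _ (p : String × Int) => (· ++ [p.2])) PySem.Dict.empty]
  rw [PySem.Dict.keys_empty]
  have hupd : PySem.Set.update ([] : List String)
      (((PySem.List.sorted dates (fun x => x) false).filterMap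
        (fun s => (pvDay? s).map (fun b => (pvMonth s, b)))).map (fun p => p.1))
      = PySem.Set.ofList (((PySem.List.sorted dates (fun x => x) false).filterMap
        (fun s => (pvDay? s).map (fun b => (pvMonth s, b)))).map (fun p => p.1)) := by
    rw [PySem.Set.ofList_eq_foldl]; rfl
  rw [hupd, pv_stream_map_fst pvDay? _ (fun s => rfl)]
  refine List.map_congr_left (fun m _ => ?_)
  rw [PySem.Dict.getD_foldl_modify_append]
  rw [pv_stream_bucket pvDay? pvDayD _ m (fun s => rfl)
      (fun s b hb => by simp [pvDayD, hb])]
  simp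

-- B's dict as an association list
theorem pv_B_eq (dates : List String) :
    format_days_by_month_alt dates =
    (PySem.List.sorted (PySem.Set.ofList ((dates.filter pvP).map pvMonth)) (fun x => x) false).map
      (fun m => (m, (PySem.List.sorted (dates.filter (pvPm m)) (fun x => x) false).map pvDayD)) := by
  have hg : ∀ s, ((pvDay? s).map (fun _ => s)).isSome = pvP s := by
    intro s; cases h : pvDay? s <;> simp [pvP, h]
  have hbfold : pvBuckets dates
      = (dates.filterMap (fun s => ((pvDay? s).map (fun _ => s)).map
          (fun b => (pvMonth s, b)))).foldl
        (fun d p => d.modify p.1 [] (· ++ [p.2])) PySem.Dict.empty := by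
    unfold pvBuckets
    exact pv_fold_skip (fun s => (pvDay? s).map (fun _ => s)) pvStepB pv_stepB_elim dates
      PySem.Dict.empty
  have hkeys : (pvBuckets dates).keys
      = PySem.Set.ofList ((dates.filter pvP).map pvMonth) := by
    rw [hbfold]
    rw [PySem.Dict.keys_foldl_modify_key _ (fun (p : String × String) => p.1) []
        (fun _ (p : String × String) => (· ++ [p.2])) PySem.Dict.empty]
    rw [PySem.Dict.keys_empty]
    rw [pv_stream_map_fst _ _ hg]
    rw [PySem.Set.ofList_eq_foldl]; rfl
  have hbd : ∀ m, (pvBuckets dates).getD m [] = dates.filter (pvPm m) := by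
    intro m
    rw [hbfold, PySem.Dict.getD_foldl_modify_append]
    rw [pv_stream_bucket _ (fun s => s) _ m hg
        (fun s b hb => by cases h : pvDay? s <;> simp [h] at hb; simp [hb])]
    simp [PySem.Dict.getD_empty]
  unfold format_days_by_month_alt
  have hndms : (PySem.List.sorted (pvBuckets dates).keys (fun x => x) false).Nodup := by
    refine (PySem.List.sorted_perm _ _ _).nodup_iff.mpr ?_
    rw [hkeys]; exact PySem.Set.nodup_ofList _
  rw [PySem.Dict.items_foldl_insert_fresh _ (fun m => m)
      (fun m => ((PySem.List.sorted ((pvBuckets dates).getD m []) (fun x => x) false).map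
        (fun s => (pvDay? s).getD 0)))
      PySem.Dict.empty (fun a _ => PySem.Dict.contains_empty a) (by simpa using hndms)]
  rw [hkeys]
  have hemp : (PySem.Dict.empty : PySem.Dict String (List Int)).items = [] := rfl
  rw [hemp, List.nil_append]
  refine List.map_congr_left (fun m _ => ?_)
  rw [hbd]
  rfl

-- the list of months of the (parseable elements of the) pre-sorted input is sorted(set(months))
theorem pv_months_eq (dates : List String) :
    PySem.Set.ofList (((PySem.List.sorted dates (fun x => x) false).filter pvP).map pvMonth)
    = PySem.List.sorted (PySem.Set.ofList ((dates.filter pvP).map pvMonth)) (fun x => x) false := by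
  have hpw1 : ((((PySem.List.sorted dates (fun x => x) false).filter pvP).map pvMonth)).Pairwise
      (· ≤ ·) := by
    refine List.Pairwise.map pvMonth (fun a b hab => pv_month_mono a b hab) ?_
    exact List.Pairwise.sublist List.filter_sublist
      (PySem.List.sorted_pairwise dates (fun x => x))
  have hM : (PySem.Set.ofList (((PySem.List.sorted dates (fun x => x) false).filter pvP).map
      pvMonth)).Pairwise (· ≤ ·) :=
    List.Pairwise.sublist (pv_ofList_sublist _) hpw1
  have hms : (PySem.List.sorted (PySem.Set.ofList ((dates.filter pvP).map pvMonth))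
      (fun x => x) false).Pairwise (· ≤ ·) := PySem.List.sorted_pairwise _ _
  have ndM := PySem.Set.nodup_ofList
    (((PySem.List.sorted dates (fun x => x) false).filter pvP).map pvMonth)
  have ndms : (PySem.List.sorted (PySem.Set.ofList ((dates.filter pvP).map pvMonth))
      (fun x => x) false).Nodup :=
    (PySem.List.sorted_perm _ _ _).nodup_iff.mpr (PySem.Set.nodup_ofList _)
  have hperm := (List.perm_ext_iff_of_nodup ndM ndms).mpr (fun a => by
    simp [PySem.Set.mem_ofList, PySem.List.mem_sorted, List.mem_filter, List.mem_map])
  exact List.eq_of_perm_of_sorted (fun a b _ _ h1 h2 => le_antisymm h1 h2) hM hms hperm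

-- filtering a sorted list is sorting the filtered list
theorem pv_bucket_eq (dates : List String) (m : String) :
    (PySem.List.sorted dates (fun x => x) false).filter (pvPm m)
    = PySem.List.sorted (dates.filter (pvPm m)) (fun x => x) false := by
  have hperm : ((PySem.List.sorted dates (fun x => x) false).filter (pvPm m)).Perm
      (PySem.List.sorted (dates.filter (pvPm m)) (fun x => x) false) :=
    ((PySem.List.sorted_perm dates (fun x => x) false).filter _).trans
      (PySem.List.sorted_perm _ _ _).symm
  refine List.eq_of_perm_of_sorted (fun a b _ _ h1 h2 => le_antisymm h1 h2) ?_ ?_ hperm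
  · exact List.Pairwise.sublist List.filter_sublist (PySem.List.sorted_pairwise dates (fun x => x))
  · exact PySem.List.sorted_pairwise _ _

-- ===== VERDICT (by name: the statement is the Claim_ definition above) =====
theorem format_days_by_month_spec : Claim_equal_format_days_by_month := by
  intro dates _
  unfold Spec_format_days_by_month
  rw [pv_A_eq, pv_B_eq, pv_months_eq]
  refine List.map_congr_left (fun m _ => ?_)
  rw [pv_bucket_eq]
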